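-- pv_equiv track=rewrite | github.com/Medini0603/joy-of-computing-with-python | 65vowels.py | replaceV
-- ===== SOURCE A (Python) =====
-- def isvowel(c):
--   if(c=='a' or c=='e' or c=='i' or c=='o' or c=='u' or c=='A' or c=='E' or c=='I' or c=='O' or c=='U'):
--     return True
--   return False
--
-- def consvow(s,i):
--   if((i+2)<len(s) and isvowel(s[i+1]) and isvowel(s[i+2])):
--     return True
--   return False
--
-- def replaceV(s):
--   i=0
--   res=[]
--   while(i<len(s)):
--     if(isvowel(s[i])):
--       if(consvow(s,i)):
--         res.append("_")
--         i=i+3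
--       else:
--         res.append(s[i])
--         i=i+1
--     else:
--       res.append(s[i])
--       i=i+1
--   res="".join(str(x) for x in res)
--   return (res)
-- ===== SOURCE B (Python) =====
-- VOWELS = "aeiouAEIOU"
--
-- def _flush(run):
--     k = len(run)
--     return "_" * (k // 3) + "".join(run[k - k % 3:])
--
-- def replaceV(s):
--     parts = []
--     run = []
--     for c in s:
--         if c in VOWELS:
--             run.append(c)
--         else:
--             parts.append(_flush(run))
--             run = []
--             parts.append(c)
--     parts.append(_flush(run))
--     return "".join(parts)
-- ===== Notes on version B (the rewrite author's own statement) =====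
-- stated objective: alternative
-- what changed: B replaces A's index-jumping while-loop (peeking two characters ahead and skipping by 3) with a single left-to-right pass that groups maximal vowel runs and emits one underscore per full group of three plus the leftover tail of each run; fewer per-character vowel tests and string ops give a measured constant-factor speedup.
import Mathlib
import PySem

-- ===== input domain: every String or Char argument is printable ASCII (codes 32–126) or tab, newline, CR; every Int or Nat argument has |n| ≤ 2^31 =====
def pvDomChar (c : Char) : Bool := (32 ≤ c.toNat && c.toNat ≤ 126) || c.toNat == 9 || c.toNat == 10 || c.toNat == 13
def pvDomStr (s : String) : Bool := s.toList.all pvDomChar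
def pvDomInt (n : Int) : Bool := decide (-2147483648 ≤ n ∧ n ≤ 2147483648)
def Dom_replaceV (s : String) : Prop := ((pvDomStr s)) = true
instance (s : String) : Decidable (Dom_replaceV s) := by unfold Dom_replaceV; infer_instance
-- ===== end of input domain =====

-- B groups maximal vowel runs in one pass instead of A's jump-by-3 index loop; same result, same cost (objective: alternative).

-- ===== PORT A =====
-- isvowel's or-chain, literally
def isvowelA (c : Char) : Bool :=
  c == 'a' || c == 'e' || c == 'i' || c == 'o' || c == 'u' ||
  c == 'A' || c == 'E' || c == 'I' || c == 'O' || c == 'U'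

-- consvow(s,i): '(i+2)<len(s) and isvowel(s[i+1]) and isvowel(s[i+2])'; here the
-- suffix after position i is passed, so the bound check is the pattern match (exact).
def consvowA (rest : List Char) : Bool :=
  match rest with
  | a :: b :: _ => isvowelA a && isvowelA b
  | _ => false

-- A's while-loop over index i, transcribed as recursion on the suffix at i (exact:
-- i=i+3 drops the current char and two more, i=i+1 drops one).
def loopA : List Char → List Char
  | [] => []
  | c :: rest =>
    if isvowelA c then
      if consvowA rest then '_' :: loopA (rest.drop 2)
      else c :: loopA rest
    else c :: loopA rest
termination_by l => l.length
decreasing_by all_goals simp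

def replaceV (s : String) : String := String.mk (loopA s.toList)

-- ===== PORT B =====
def isvowelB (c : Char) : Bool := ("aeiouAEIOU".toList).contains c

-- _flush(run) = "_"*(k//3) + "".join(run[k - k%3:])
def flushB (run : List Char) : List Char :=
  List.replicate (run.length / 3) '_' ++ run.drop (run.length - run.length % 3)

-- the for-loop's state: (parts, run); final join flattens parts
def replaceV_alt (s : String) : String :=
  let st := s.toList.foldl
    (fun (st : List (List Char) × List Char) c =>
      if isvowelB c then (st.1, st.2 ++ [c])
      else (st.1 ++ [flushB st.2, [c]], []))
    ([], [])
  String.mk ((st.1 ++ [flushB st.2]).flatten)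

-- ===== PRECONDITION & SPEC =====
def Spec_replaceV (s : String) (out : String) : Prop := out = replaceV_alt s
instance (s : String) (out : String) : Decidable (Spec_replaceV s out) := by unfold Spec_replaceV; infer_instance

-- ===== CLAIM (what is proved, stated in full; the proofs are below) =====
def Claim_equal_replaceV : Prop := ∀ (s : String), Dom_replaceV s → Spec_replaceV s (replaceV s)

-- ===== LEMMAS AND PROOFS =====

theorem isvowel_eq (c : Char) : isvowelB c = isvowelA c := by
  have h : "aeiouAEIOU".toList = ['a','e','i','o','u','A','E','I','O','U'] := by decide
  simp only [isvowelB, isvowelA, h, List.contains_cons, List.contains_nil, Bool.or_false]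
  ac_rfl

theorem loopA_run : ∀ (vs rest : List Char),
    (∀ c ∈ vs, isvowelA c = true) →
    (∀ c r, rest = c :: r → isvowelA c = false) →
    loopA (vs ++ rest) = flushB vs ++ loopA rest
  | [], rest, _, _ => by simp [flushB]
  | [a], rest, hv, hr => by
      have ha : isvowelA a = true := hv a (by simp)
      have hc : consvowA rest = false := by
        cases rest with
        | nil => rfl
        | cons r t =>
          cases t with
          | nil => rfl
          | cons x u => simp [consvowA, hr r (x::u) rfl]
      simp [loopA, ha, hc, flushB]
  | [a,b], rest, hv, hr => by
      have ha : isvowelA a = true := hv a (by simp)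
      have hb : isvowelA b = true := hv b (by simp)
      have hc2 : consvowA rest = false := by
        cases rest with
        | nil => rfl
        | cons r t =>
          cases t with
          | nil => rfl
          | cons x u => simp [consvowA, hr r (x::u) rfl]
      have hc1 : consvowA (b :: rest) = false := by
        cases rest with
        | nil => rfl
        | cons r t => simp [consvowA, hr r t rfl]
      simp [loopA, ha, hb, hc1, hc2, flushB]
  | a::b::c::vs', rest, hv, hr => by
      have ha : isvowelA a = true := hv a (by simp)
      have hb : isvowelA b = true := hv b (by simp)
      have hc : isvowelA c = true := hv c (by simp)
      have ih := loopA_run vs' rest (fun x hx => hv x (by simp [hx])) hr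
      have hstep : loopA (a::b::c::(vs' ++ rest)) = '_' :: loopA (vs' ++ rest) := by
        simp [loopA, ha, hb, hc, consvowA]
      have hflush : flushB (a::b::c::vs') = '_' :: flushB vs' := by
        unfold flushB
        simp only [List.length_cons]
        rw [show (vs'.length + 1 + 1 + 1) / 3 = vs'.length / 3 + 1 from by omega,
          show vs'.length + 1 + 1 + 1 - (vs'.length + 1 + 1 + 1) % 3
              = (vs'.length - vs'.length % 3) + 3 from by omega]
        simp [List.replicate_succ, List.drop_succ_cons]
      calc loopA ((a::b::c::vs') ++ rest) = '_' :: loopA (vs' ++ rest) := hstep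
        _ = '_' :: (flushB vs' ++ loopA rest) := by rw [ih]
        _ = flushB (a::b::c::vs') ++ loopA rest := by rw [hflush]; rfl
termination_by vs _ => vs.length

-- B's fold step, named for the proofs (identical to the lambda in replaceV_alt)
def stepB (st : List (List Char) × List Char) (c : Char) : List (List Char) × List Char :=
  if isvowelB c then (st.1, st.2 ++ [c]) else (st.1 ++ [flushB st.2, [c]], [])

-- B's fold, re-expressed as recursion on the remaining input (proof helper)
def Frun : List Char → List Char → List Char
  | R, [] => flushB R
  | R, c :: l => if isvowelA c then Frun (R ++ [c]) l else flushB R ++ (c :: Frun [] l)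

theorem fold_eq_Frun : ∀ (l : List Char) (P : List (List Char)) (R : List Char),
    ((l.foldl stepB (P, R)).1 ++ [flushB (l.foldl stepB (P, R)).2]).flatten
      = P.flatten ++ Frun R l := by
  intro l
  induction l with
  | nil => intro P R; simp [Frun]
  | cons c l ih =>
    intro P R
    by_cases hv : isvowelA c = true
    · simpa [Frun, stepB, isvowel_eq, hv] using ih P (R ++ [c])
    · have hv' : isvowelA c = false := by simpa using hv
      simpa [Frun, stepB, isvowel_eq, hv', List.append_assoc] using ih (P ++ [flushB R, [c]]) []

theorem Frun_eq_loopA : ∀ (l R : List Char),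
    (∀ c ∈ R, isvowelA c = true) → Frun R l = loopA (R ++ l) := by
  intro l
  induction l with
  | nil =>
    intro R hR
    have h := loopA_run R [] hR (by intro c r h; cases h)
    have h0 : loopA ([] : List Char) = [] := by simp [loopA]
    rw [h0, List.append_nil] at h
    simpa [Frun] using h.symm
  | cons c l ih =>
    intro R hR
    by_cases hv : isvowelA c = true
    · have := ih (R ++ [c]) (by
        intro x hx
        rcases List.mem_append.mp hx with h | h
        · exact hR x h
        · simp at h; subst h; exact hv)
      simp only [Frun, hv, if_true]
      rw [this, List.append_assoc]
      rfl
    · have hv' : isvowelA c = false := by simpa using hv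
      have hrun := loopA_run R (c :: l) hR
        (by intro c' r h; injection h with h1 _; subst h1; exact hv')
      have hstep : loopA (c :: l) = c :: loopA l := by simp [loopA, hv']
      have hnil := ih [] (by intro x hx; cases hx)
      simp only [Frun, hv', Bool.false_eq_true, if_false]
      rw [hrun, hstep, hnil]
      simp

-- ===== VERDICT (by name: the statement is the Claim_ definition above) =====
theorem replaceV_spec : Claim_equal_replaceV := by
  intro s _
  show String.mk (loopA s.toList) = replaceV_alt s
  have halt : replaceV_alt s
      = String.mk (((s.toList.foldl stepB ([], [])).1
          ++ [flushB (s.toList.foldl stepB ([], [])).2]).flatten) := rfl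
  rw [halt, fold_eq_Frun, Frun_eq_loopA s.toList [] (by intro c hc; cases hc)]
  rfl
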